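-- pv_equiv track=rewrite | github.com/Kireiidatte/Algorithm | Programmers/N진수 게임.py | get_notation
-- ===== SOURCE A (Python) =====
-- num_dic = {10:'A', 11:'B', 12:'C', 13:'D', 14:'E', 15:'F'}
--
-- def get_notation(n, size):
--     total = '0'
--     for i in range(1, size+1):
--         tmp = ''
--         while i > 0:
--             i, mod = divmod(i, n)
--             if mod >= 10:
--                 tmp += num_dic[mod]
--             else:
--                 tmp += str(mod)
--         total += tmp[::-1]
--
--     return total
-- ===== SOURCE B (Python) =====
-- def get_notation(n, size):
--     digits = "0123456789ABCDEF"
--     def convert(i):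
--         return "" if i == 0 else convert(i // n) + digits[i % n]
--     parts = []
--     i = size
--     while i >= 1:
--         parts.append(convert(i))
--         i -= 1
--     return "0" + "".join(reversed(parts))
-- ===== Notes on version B (the rewrite author's own statement) =====
-- stated objective: simpler
-- what changed: Replaces the dict lookup plus append-then-reverse digit loop by a recursive convert emitting digits most-significant-first via an alphabet string '0123456789ABCDEF', and assembles the result back-to-front (from size down to 1, prepending each converted number) instead of A's forward accumulation.
-- outside the precondition, e.g. on get_notation(-2, 2): A returns '01-0', B returns '0FFF0'; on get_notation(-2, 3): A returns '01-01-', B returns '0FFF0FF0F'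
import Mathlib
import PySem

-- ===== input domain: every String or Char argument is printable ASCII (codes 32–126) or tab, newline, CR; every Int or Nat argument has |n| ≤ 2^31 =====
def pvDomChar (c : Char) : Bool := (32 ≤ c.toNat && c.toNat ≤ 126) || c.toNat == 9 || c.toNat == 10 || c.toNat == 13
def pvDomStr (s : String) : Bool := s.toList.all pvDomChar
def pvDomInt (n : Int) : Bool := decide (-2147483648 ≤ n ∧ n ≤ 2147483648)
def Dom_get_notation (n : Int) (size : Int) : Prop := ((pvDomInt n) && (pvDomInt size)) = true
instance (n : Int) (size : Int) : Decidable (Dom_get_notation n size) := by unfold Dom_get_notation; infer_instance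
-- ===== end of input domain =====

-- B replaces A's dict-lookup + append-then-reverse digit loop by a recursive convert over
-- an alphabet string emitting digits most-significant-first, and assembles the answer
-- back-to-front (size down to 1, prepending); objective: simpler.


-- ===== PORT A =====
-- num_dic = {10:'A', …, 15:'F'} (module constant of A)
def numDic : PySem.Dict Int String :=
  PySem.Dict.ofList [(10, "A"), (11, "B"), (12, "C"), (13, "D"), (14, "E"), (15, "F")]

-- 'num_dic[mod] if mod >= 10 else str(mod)'
-- (the dict lookup's KeyError case, .get? = none, is unreachable inside Pre_; .getD "" stands for it)
def digitStr (m : Int) : String :=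
  if m ≥ 10 then (numDic.get? m).getD "" else PySem.Int.toStr m

-- the 'while i > 0' loop of A; fuel i.toNat+1 suffices inside Pre_ (A diverges for n = 1, outside Pre_)
def aInner : Nat → Int → Int → String → String
  | 0, _, _, tmp => tmp
  | f + 1, n, i, tmp =>
    if i > 0 then
      aInner f n (PySem.Int.floordiv i n) (tmp ++ digitStr (PySem.Int.mod i n))
    else tmp

def get_notation (n : Int) (size : Int) : String :=
  (PySem.List.pyRange 1 (size + 1) 1).foldl
    (fun total i =>
      total ++ (PySem.Str.slice? (aInner (i.toNat + 1) n i "") none none (-1)).getD "")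
    "0"

-- ===== PORT B =====
-- digits[i % n] in B — a one-character string; IndexError (none) is unreachable inside Pre_
def bDigit (m : Int) : String :=
  match PySem.Str.pyGet? "0123456789ABCDEF" m with
  | some c => String.ofList [c]
  | none => ""

-- B's recursive convert(i); fuel i.toNat+1 suffices inside Pre_
def bConv : Nat → Int → Int → String
  | 0, _, _ => ""
  | f + 1, n, i =>
    if i = 0 then ""
    else bConv f n (PySem.Int.floordiv i n) ++ bDigit (PySem.Int.mod i n)

-- B's 'while i >= 1: parts.append(convert(i)); i -= 1'; fuel size.toNat suffices
def bOuter : Nat → Int → Int → List String → List String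
  | 0, _, _, parts => parts
  | f + 1, n, i, parts =>
    if i ≥ 1 then bOuter f n (i - 1) (parts ++ [bConv (i.toNat + 1) n i]) else parts

def get_notation_alt (n : Int) (size : Int) : String :=
  "0" ++ PySem.Str.join "" (bOuter size.toNat n size []).reverse

-- ===== PRECONDITION & SPEC =====
-- Pre_ keeps the bases the task ("N진수 게임", 2 ≤ n ≤ 16) means and on which A returns normally:
-- n = 0 raises ZeroDivisionError, n = 1 diverges, n ≥ 17 with size ≥ 16 raises KeyError; for n ≤ -1
-- A returns accidental strings (char-wise reversal splits multi-character negative 'digits' like '-1');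
-- size ≤ 0 (empty range, both return "0") is admitted for any n.
def Pre_get_notation (n : Int) (size : Int) : Prop := (2 ≤ n ∧ (n ≤ 16 ∨ size ≤ 15)) ∨ size ≤ 0
instance (n : Int) (size : Int) : Decidable (Pre_get_notation n size) := by unfold Pre_get_notation; infer_instance
def pvWitness_get_notation : Int × Int := (2, 5)

def Spec_get_notation (n : Int) (size : Int) (out : String) : Prop := out = get_notation_alt n size
instance (n : Int) (size : Int) (out : String) : Decidable (Spec_get_notation n size out) := by unfold Spec_get_notation; infer_instance

-- ===== CLAIM =====
def Claim_equal_get_notation : Prop := ∀ (n : Int) (size : Int), Dom_get_notation n size → Pre_get_notation n size → Spec_get_notation n size (get_notation n size)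

-- ===== LEMMAS AND PROOFS =====

-- the two digit renderings agree on every digit reachable inside Pre_
theorem digit_eq (m : Int) (h0 : 0 ≤ m) (h1 : m ≤ 15) : bDigit m = digitStr m := by
  interval_cases m <;> decide

theorem digit_len_one (m : Int) (h0 : 0 ≤ m) (h1 : m ≤ 15) : (bDigit m).toList.length = 1 := by
  interval_cases m <;> decide

theorem digit_rev (m : Int) (h0 : 0 ≤ m) (h1 : m ≤ 15) :
    (bDigit m).toList.reverse = (bDigit m).toList := by
  obtain ⟨a, ha⟩ := List.length_eq_one_iff.mp (digit_len_one m h0 h1)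
  rw [ha, List.reverse_singleton]

-- A's inner while loop produces B's convert string, reversed (char-wise)
theorem aInner_eq_rev_bConv (f : Nat) (n i : Int) (tmp : String)
    (hn : 2 ≤ n) (hi : 0 ≤ i) (hf : i.toNat < f) (hd : n ≤ 16 ∨ i ≤ 15) :
    (aInner f n i tmp).toList = tmp.toList ++ (bConv f n i).toList.reverse := by
  induction f generalizing i tmp with
  | zero => omega
  | succ f ih =>
    simp only [aInner, bConv]
    by_cases hpos : i > 0
    · rw [if_pos hpos, if_neg (by omega : ¬ i = 0)]
      have hn0 : (0 : Int) < n := by omega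
      have hq : PySem.Int.floordiv i n = i / n := PySem.Int.floordiv_eq_ediv_of_pos hn0
      have hm : PySem.Int.mod i n = i % n := PySem.Int.mod_eq_emod_of_pos hn0
      have hq0 : 0 ≤ PySem.Int.floordiv i n := by
        rw [hq]; exact Int.ediv_nonneg hi (by omega)
      have hqlt : PySem.Int.floordiv i n < i := by
        rw [hq]
        have hle : i / n ≤ i := Int.ediv_le_self n hi
        rcases lt_or_eq_of_le hle with h | h
        · exact h
        · exfalso
          have h2 : i * 1 < i * n := by
            exact mul_lt_mul_of_pos_left (by omega) hpos
          have h3 : i / n * n ≤ i := Int.ediv_mul_le i (by omega)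
          rw [h] at h3
          omega
      have hm0 : 0 ≤ PySem.Int.mod i n := by
        rw [hm]; exact Int.emod_nonneg i (by omega)
      have hmlt : PySem.Int.mod i n < n := by
        rw [hm]; exact Int.emod_lt_of_pos i hn0
      have hm15 : PySem.Int.mod i n ≤ 15 := by
        rcases hd with h | h
        · omega
        · by_cases hin : i < n
          · have : PySem.Int.mod i n = i := by rw [hm]; exact Int.emod_eq_of_lt hi hin
            omega
          · omega
      have hd' : n ≤ 16 ∨ PySem.Int.floordiv i n ≤ 15 := by
        rcases hd with h | h
        · exact Or.inl h
        · exact Or.inr (by omega)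
      rw [ih _ _ hq0 (by omega) hd']
      rw [← digit_eq _ hm0 hm15]
      simp [String.toList_append, digit_rev _ hm0 hm15]
    · rw [if_neg hpos, if_pos (by omega : i = 0)]
      simp

-- B's countdown loop appends the converts of size..1 (reversed forward order)
theorem bOuter_eq (f : Nat) (n i : Int) (parts : List String)
    (hi : 0 ≤ i) (hf : i.toNat ≤ f) :
    bOuter f n i parts
      = parts ++ (PySem.List.pyRange 1 (i + 1) 1).reverse.map
          (fun j => bConv (j.toNat + 1) n j) := by
  induction f generalizing i parts with
  | zero =>
    have : i = 0 := by omega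
    subst this
    simp [bOuter]
  | succ f ih =>
    simp only [bOuter]
    by_cases h1 : i ≥ 1
    · rw [if_pos h1, ih (i - 1) _ (by omega) (by omega),
          PySem.List.pyRange_one_succ_right (by omega : (1:Int) ≤ i)]
      have hii : i - 1 + 1 = i := by omega
      rw [hii]
      simp [List.reverse_append]
    · rw [if_neg h1, PySem.List.pyRange_one_eq_nil (by omega : i + 1 ≤ 1)]
      simp

-- empty separator: join is concatenation
theorem intersperse_nil_flatten (l : List (List Char)) :
    (List.intersperse ([] : List Char) l).flatten = l.flatten := by
  induction l with
  | nil => rfl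
  | cons x xs ih =>
    cases xs with
    | nil => rfl
    | cons y ys =>
      rw [List.intersperse_cons₂, List.flatten_cons, List.flatten_cons, List.flatten_cons,
        List.flatten_cons] at *
      simp [← ih]

theorem toList_join_nil (parts : List String) :
    (PySem.Str.join "" parts).toList = (parts.map String.toList).flatten := by
  rw [PySem.Str.toList_join]
  show PySem.Chars.join [] _ = _
  simp only [PySem.Chars.join, List.intercalate]
  exact intersperse_nil_flatten _

-- 'total += piece' over a list is init ++ concatenation of the pieces
theorem foldl_append_flat (g : Int → String) (l : List Int) (init : String) :
    (l.foldl (fun t i => t ++ g i) init).toList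
      = init.toList ++ (l.map (fun i => (g i).toList)).flatten := by
  induction l generalizing init with
  | nil => simp
  | cons x xs ih =>
    simp only [List.foldl_cons, List.map_cons, List.flatten_cons]
    rw [ih, String.toList_append, List.append_assoc]

-- ===== VERDICT =====
theorem get_notation_spec : Claim_equal_get_notation := by
  intro n size _hdom hpre
  unfold Spec_get_notation get_notation get_notation_alt
  apply String.toList_inj.mp
  by_cases hsz : size ≤ 0
  · have hf : size.toNat = 0 := by omega
    rw [PySem.List.pyRange_one_eq_nil (by omega : size + 1 ≤ 1), hf]
    simp [bOuter]
  · have hpre' : 2 ≤ n ∧ (n ≤ 16 ∨ size ≤ 15) := by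
      rcases hpre with h | h
      · exact h
      · omega
    obtain ⟨hn, hd⟩ := hpre'
    rw [foldl_append_flat, String.toList_append,
        bOuter_eq size.toNat n size [] (by omega) (le_refl _),
        List.nil_append, List.map_reverse, List.reverse_reverse, toList_join_nil,
        List.map_map]
    have hmap : List.map
        (fun i => ((PySem.Str.slice? (aInner (i.toNat + 1) n i "") none none (-1)).getD "").toList)
        (PySem.List.pyRange 1 (size + 1) 1)
        = List.map (String.toList ∘ fun j => bConv (j.toNat + 1) n j)
            (PySem.List.pyRange 1 (size + 1) 1) := by
      apply List.map_congr_left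
      intro x hx
      rw [PySem.List.mem_pyRange_one] at hx
      simp only [Function.comp]
      rw [PySem.Str.slice?_none_none_neg_one, Option.getD_some]
      have h := aInner_eq_rev_bConv (x.toNat + 1) n x "" hn (by omega) (by omega) (by omega)
      rw [h]
      simp [String.ofList_toList]
    rw [hmap]
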